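-- pv_equiv track=rewrite | github.com/prabhat-gp/GFG | Strings/Strings Easy/20_modified_str.py | modified
-- ===== SOURCE A (Python) =====
-- def modified(str):
--     cnt = 0
--     i = 0
--     while i <= len(str) - 3:
--         if str[i] == str[i + 1] and str[i] == str[i + 2]:
--             cnt += 1
--             i += 2
--         else:
--             i += 1
--
--     return cnt
-- ===== SOURCE B (Python) =====
-- def modified(str):
--     # run-length decomposition: each maximal run of equal chars of length L
--     # contributes (L - 1) // 2 triples
--     total = 0
--     run = 0
--     prev = ''
--     for ch in str:
--         if run > 0 and ch == prev:
--             run += 1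
--         else:
--             if run > 0:
--                 total += (run - 1) // 2
--             prev = ch
--             run = 1
--     if run > 0:
--         total += (run - 1) // 2
--     return total
-- ===== Notes on version B (the rewrite author's own statement) =====
-- stated objective: alternative
-- what changed: Replaced A's greedy index-jumping scan (match a triple, skip 2) by a single run-length pass that adds the closed formula (L-1)//2 for each maximal run of equal characters.
import Mathlib
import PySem

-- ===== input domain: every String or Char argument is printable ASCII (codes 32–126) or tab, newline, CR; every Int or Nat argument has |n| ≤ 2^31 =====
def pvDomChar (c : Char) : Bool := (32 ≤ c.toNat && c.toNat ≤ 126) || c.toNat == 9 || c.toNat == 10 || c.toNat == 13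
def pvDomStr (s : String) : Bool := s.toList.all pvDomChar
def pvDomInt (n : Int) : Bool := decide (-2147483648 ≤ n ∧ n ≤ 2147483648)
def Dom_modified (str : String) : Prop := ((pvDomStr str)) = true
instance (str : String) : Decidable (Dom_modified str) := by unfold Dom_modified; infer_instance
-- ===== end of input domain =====

-- B replaces A's index-jumping greedy scan by a run-length decomposition with the
-- per-run closed formula (L-1)/2 (objective: alternative decomposition, same cost).


-- ===== PORT A =====
-- A's while loop over index i (i += 2 on a match, i += 1 otherwise) is ported as a
-- recursion on the suffix str[i:]: the guard i <= len(str)-3 is "at least 3 chars left".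
def modifiedLoop : List Char → Int
  | a :: b :: c :: rest =>
      if a = b ∧ a = c then 1 + modifiedLoop (c :: rest)
      else modifiedLoop (b :: c :: rest)
  | _ => 0
termination_by l => l.length
decreasing_by all_goals simp

def modified (str : String) : Int := modifiedLoop str.toList

-- ===== PORT B =====
-- B's single pass keeping (prev char, current run length, total); closing a run of
-- length n adds (n-1)/2.
def modifiedAltLoop (c : Char) (n : Nat) : List Char → Int
  | [] => ((n - 1) / 2 : Nat)
  | d :: rest =>
      if d = c then modifiedAltLoop c (n + 1) rest
      else ((n - 1) / 2 : Nat) + modifiedAltLoop d 1 rest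

def modified_alt (str : String) : Int :=
  match str.toList with
  | [] => 0
  | c :: rest => modifiedAltLoop c 1 rest

-- ===== PRECONDITION & SPEC =====
def Spec_modified (str : String) (out : Int) : Prop := out = modified_alt str
instance (str : String) (out : Int) : Decidable (Spec_modified str out) := by unfold Spec_modified; infer_instance

-- ===== CLAIM (what is proved, stated in full; the proofs are below) =====
def Claim_equal_modified : Prop := ∀ (str : String), Dom_modified str → Spec_modified str (modified str)

-- ===== LEMMAS AND PROOFS =====

-- On a maximal run of n copies of c followed by rest (not starting with c),
-- A's greedy loop counts (n-1)/2 triples in the run and then continues on rest.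
lemma modifiedLoop_run (c : Char) : ∀ (n : Nat) (rest : List Char),
    rest.head? ≠ some c →
    modifiedLoop (List.replicate n c ++ rest) = ((n - 1) / 2 : Nat) + modifiedLoop rest := by
  intro n
  induction n using Nat.strong_induction_on with
  | _ n ih =>
    match n with
    | 0 => intro rest _; simp
    | 1 =>
      intro rest h
      match rest with
      | [] => simp [modifiedLoop]
      | [d] => simp [modifiedLoop]
      | d :: e :: r =>
        have hdc : c ≠ d := by intro hh; exact h (by simp [hh])
        simp [modifiedLoop, hdc]
    | 2 =>
      intro rest h
      match rest with
      | [] => simp [modifiedLoop]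
      | d :: r =>
        have hdc : c ≠ d := by intro hh; exact h (by simp [hh])
        have h1 := ih 1 (by omega) (d :: r) h
        simp only [List.replicate, List.cons_append, List.nil_append] at h1 ⊢
        rw [modifiedLoop]
        simp [hdc, h1]
    | (m + 3) =>
      intro rest h
      have h1 := ih (m + 1) (by omega) rest h
      have hrep : List.replicate (m + 3) c ++ rest
          = c :: c :: c :: (List.replicate m c ++ rest) := by
        simp [List.replicate_succ]
      have hrep2 : List.replicate (m + 1) c ++ rest
          = c :: (List.replicate m c ++ rest) := by
        simp [List.replicate_succ]
      have hd : ((m + 3 - 1) / 2 : Nat) = (m + 1 - 1) / 2 + 1 := by omega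
      rw [hrep, modifiedLoop, if_pos (⟨rfl, rfl⟩ : c = c ∧ c = c), ← hrep2, h1, hd]
      push_cast
      ring

-- B's loop state (c, n) corresponds to A's loop running on replicate n c ++ rest.
lemma modifiedLoop_eq_alt : ∀ (rest : List Char) (c : Char) (n : Nat),
    modifiedLoop (List.replicate n c ++ rest) = modifiedAltLoop c n rest := by
  intro rest
  induction rest with
  | nil =>
    intro c n
    rw [modifiedLoop_run c n [] (by simp)]
    simp [modifiedAltLoop, modifiedLoop]
  | cons d r ih =>
    intro c n
    by_cases hdc : d = c
    · subst hdc
      have : List.replicate n d ++ d :: r = List.replicate (n + 1) d ++ r := by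
        simp [List.replicate_succ']
      rw [this, ih d (n + 1), modifiedAltLoop]
      simp
    · rw [modifiedLoop_run c n (d :: r) (by simpa using hdc)]
      rw [modifiedAltLoop]
      simp only [if_neg hdc]
      congr 1
      have : (d :: r) = List.replicate 1 d ++ r := by simp
      rw [this, ih d 1]

-- ===== VERDICT (by name: the statement is the Claim_ definition above) =====
theorem modified_spec : Claim_equal_modified := by
  intro str _
  unfold Spec_modified modified modified_alt
  match h : str.toList with
  | [] => simp [modifiedLoop]
  | c :: rest =>
    show modifiedLoop (c :: rest) = modifiedAltLoop c 1 rest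
    have h2 : c :: rest = List.replicate 1 c ++ rest := by simp
    rw [h2, modifiedLoop_eq_alt]
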